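-- pv_equiv track=rewrite | github.com/bigbio/ibaqpy | ibaq/ibaqpy_commons.py | parse_uniprot_accession
-- ===== SOURCE A (Python) =====
-- def parse_uniprot_accession(uniprot_id: str) -> str:
--     """
--     Parse the uniprot accession from the uniprot id in the form of
--     tr|CONTAMINANT_Q3SX28|CONTAMINANT_TPM2_BOVIN and convert to CONTAMINANT_Q3SX28
--     :param uniprot_id: uniprot id
--     :return: uniprot accession
--     """
--     uniprot_list = uniprot_id.split(";")
--     result_uniprot_list = []
--     for accession in uniprot_list:
--         if accession.count("|") == 2:
--             accession = accession.split("|")[1]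
--         result_uniprot_list.append(accession)
--     return ";".join(result_uniprot_list)
-- ===== SOURCE B (Python) =====
-- def parse_uniprot_accession(uniprot_id: str) -> str:
--     """Single pass over the characters: stream the ';'-segments through a small
--     field accumulator instead of split/count/split/join."""
--     out = []                 # output characters
--     parts = [[]]             # '|'-separated fields of the current segment (as char lists)
--     first = True
--     for ch in uniprot_id + ";":   # sentinel ';' flushes the final segment
--         if ch == ";":
--             if not first:
--                 out.append(";")
--             if len(parts) == 3:
--                 out += parts[1]
--             else:
--                 for k, field in enumerate(parts):
--                     if k:
--                         out.append("|")
--                     out += field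
--             parts = [[]]
--             first = False
--         elif ch == "|":
--             parts.append([])
--         else:
--             parts[-1].append(ch)
--     return "".join(out)
-- ===== Notes on version B (the rewrite author's own statement) =====
-- stated objective: alternative
-- what changed: Replaces A's pipeline (split on the semicolon separator, per-segment pipe-count plus a second split, then rejoin) with a single character-level scan: one pass over the string with a field accumulator that flushes each segment at its boundary, writing the output directly.
import Mathlib
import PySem

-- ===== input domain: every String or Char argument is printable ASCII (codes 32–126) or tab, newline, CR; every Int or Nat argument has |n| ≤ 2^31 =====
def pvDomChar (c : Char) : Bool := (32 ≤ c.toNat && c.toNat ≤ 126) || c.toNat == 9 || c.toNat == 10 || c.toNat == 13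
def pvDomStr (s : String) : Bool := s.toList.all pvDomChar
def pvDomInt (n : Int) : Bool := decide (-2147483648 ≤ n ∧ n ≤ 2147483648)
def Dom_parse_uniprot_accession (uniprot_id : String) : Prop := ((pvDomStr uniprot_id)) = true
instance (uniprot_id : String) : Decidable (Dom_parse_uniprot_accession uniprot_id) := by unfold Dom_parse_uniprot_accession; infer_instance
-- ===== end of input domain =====

-- B replaces A's split/count/resplit/join pipeline with a single character-level scan that
-- flushes each segment through a field accumulator at segment boundaries (same O(n) cost, different algorithm).

-- ===== PORT A =====
def parse_uniprot_accession (uniprot_id : String) : String :=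
  let uniprot_list := (PySem.Str.split? uniprot_id ";").getD []  -- sep ";" ≠ "", so split? is always `some`
  let result_uniprot_list := uniprot_list.foldl (fun acc accession =>
    let accession := if PySem.Str.count accession "|" == 2 then
        -- accession.split("|")[1]; index 1 is in range because the segment has two '|'
        (PySem.List.pyGet? ((PySem.Str.split? accession "|").getD []) 1).getD ""
      else accession
    acc ++ [accession]) []
  PySem.Str.join ";" result_uniprot_list

-- ===== PORT B =====
-- the `for k, field in enumerate(parts): if k: out.append("|"); out += field` loop of Source B
def pvEmit (out : List Char) (parts : List (List Char)) : List Char :=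
  (PySem.List.enumerate parts).foldl (fun o kf => (if kf.1 == 0 then o else o ++ ['|']) ++ kf.2) out

-- the body of Source B's `for ch in uniprot_id + ";"` loop; state = (out, first, parts)
def pvStep (st : List Char × Bool × List (List Char)) (ch : Char) : List Char × Bool × List (List Char) :=
  if ch = ';' then
    let out := if st.2.1 then st.1 else st.1 ++ [';']
    -- parts[1]: in range because the length-3 test just succeeded
    let out := if st.2.2.length == 3 then out ++ (PySem.List.pyGet? st.2.2 1).getD []
               else pvEmit out st.2.2
    (out, false, [[]])
  else if ch = '|' then (st.1, st.2.1, st.2.2 ++ [[]])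
  else -- parts[-1].append(ch): parts is never empty, getLastD's default is unreachable
    (st.1, st.2.1, st.2.2.dropLast ++ [st.2.2.getLastD [] ++ [ch]])

def parse_uniprot_accession_alt (uniprot_id : String) : String :=
  -- "".join(out) on a list of single characters
  String.ofList ((uniprot_id.toList ++ [';']).foldl pvStep ([], true, [[]])).1

-- ===== PRECONDITION & SPEC =====
def Spec_parse_uniprot_accession (uniprot_id : String) (out : String) : Prop := out = parse_uniprot_accession_alt uniprot_id
instance (uniprot_id : String) (out : String) : Decidable (Spec_parse_uniprot_accession uniprot_id out) := by unfold Spec_parse_uniprot_accession; infer_instance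

-- ===== CLAIM (what is proved, stated in full; the proofs are below) =====
def Claim_equal_parse_uniprot_accession : Prop := ∀ (uniprot_id : String), Dom_parse_uniprot_accession uniprot_id → Spec_parse_uniprot_accession uniprot_id (parse_uniprot_accession uniprot_id)

-- ===== LEMMAS AND PROOFS =====

-- join with separator, in the shape B's scan produces
def pvJoin (sep : List Char) : List (List Char) → List Char
  | [] => []
  | x :: xs => x ++ xs.flatMap (fun f => sep ++ f)

-- merge a pending buffer into the head of a field list
def pvGlue (b : List Char) : List (List Char) → List (List Char)
  | [] => [b]
  | x :: xs => (b ++ x) :: xs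

-- A's per-segment transformation, on char lists
def pvFixA (seg : List Char) : List Char :=
  if seg.count '|' = 2 then ((List.splitOnP (· == '|') seg)[1]?).getD [] else seg

theorem pvJoin_eq_intercalate (sep : List Char) (L : List (List Char)) :
    pvJoin sep L = sep.intercalate L := by
  induction L with
  | nil => simp [pvJoin, List.intercalate]
  | cons x xs ih =>
    cases xs with
    | nil => simp [pvJoin, List.intercalate]
    | cons y ys =>
      have h2 : sep.intercalate (x :: y :: ys) = x ++ sep ++ sep.intercalate (y :: ys) := by
        simp [List.intercalate, List.intersperse]
      rw [h2, ← ih]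
      simp [pvJoin]

theorem pv_go_spec (c : Char) : ∀ (fuel : Nat) (l cur : List Char) (acc : List (List Char)),
    l.length < fuel →
    PySem.Chars.splitOn.go [c] fuel l cur acc
      = acc.reverse ++ pvGlue cur.reverse (List.splitOnP (· == c) l) := by
  intro fuel
  induction fuel with
  | zero => intro l cur acc h; omega
  | succ f ih =>
    intro l cur acc h
    cases l with
    | nil => simp [PySem.Chars.splitOn.go, pvGlue]
    | cons x rest =>
      rw [PySem.Chars.splitOn.go]
      by_cases hx : x = c
      · subst hx
        have hpre : [x].isPrefixOf (x :: rest) = true := by simp [List.isPrefixOf]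
        rw [if_pos hpre]
        rw [show List.drop [x].length (x :: rest) = rest from by simp]
        rw [ih rest [] (cur.reverse :: acc) (by simp at h ⊢; omega)]
        rw [List.splitOnP_cons]
        obtain ⟨hd, tl, hsp⟩ := List.exists_cons_of_ne_nil (List.splitOnP_ne_nil (· == x) rest)
        rw [hsp]
        simp [pvGlue]
      · have hpre : [c].isPrefixOf (x :: rest) = false := by
          simp [List.isPrefixOf]; exact fun hh => (hx hh.symm).elim
        rw [if_neg (by simp [hpre])]
        rw [ih rest (x :: cur) acc (by simp at h ⊢; omega)]
        rw [List.splitOnP_cons]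
        obtain ⟨hd, tl, hsp⟩ := List.exists_cons_of_ne_nil (List.splitOnP_ne_nil (· == c) rest)
        rw [hsp]
        simp [hx, pvGlue]

theorem pv_splitOn_single (c : Char) (cs : List Char) :
    PySem.Chars.splitOn cs [c] = List.splitOnP (· == c) cs := by
  rw [PySem.Chars.splitOn, pv_go_spec c (cs.length + 1) cs [] [] (by omega)]
  obtain ⟨hd, tl, hsp⟩ := List.exists_cons_of_ne_nil (List.splitOnP_ne_nil (· == c) cs)
  rw [hsp]; simp [pvGlue]

theorem pv_count_go (c : Char) : ∀ (l : List Char) (fuel : Nat) (acc : Nat),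
    l.length ≤ fuel →
    PySem.Chars.count.go [c] fuel l acc = acc + l.count c := by
  intro l
  induction l with
  | nil => intro fuel acc h; cases fuel <;> simp [PySem.Chars.count.go]
  | cons x rest ih =>
    intro fuel acc h
    cases fuel with
    | zero => simp at h
    | succ f =>
      rw [PySem.Chars.count.go]
      by_cases hx : x = c
      · subst hx
        rw [if_pos (by simp [List.isPrefixOf])]
        rw [show List.drop [x].length (x :: rest) = rest from by simp]
        rw [ih f (acc+1) (by simp at h ⊢; omega)]
        simp; omega
      · rw [if_neg (by simp [List.isPrefixOf]; exact fun hh => (hx hh.symm).elim)]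
        rw [ih f acc (by simp at h ⊢; omega)]
        simp [hx]

theorem pv_count_single (c : Char) (cs : List Char) :
    PySem.Chars.count cs [c] = cs.count c := by
  rw [PySem.Chars.count, if_neg (by simp)]
  rw [pv_count_go c cs cs.length 0 (le_refl _)]
  omega

theorem pv_length_splitOnP (p : Char → Bool) (l : List Char) :
    (List.splitOnP p l).length = l.countP p + 1 := by
  induction l with
  | nil => simp
  | cons a l ih =>
    rw [List.splitOnP_cons]
    by_cases h : p a = true <;> simp [h, ih]

theorem pv_mem_splitOnP (p : Char → Bool) (l : List Char) :
    ∀ seg ∈ List.splitOnP p l, ∀ a ∈ seg, p a = false := by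
  induction l with
  | nil => simp
  | cons x xs ih =>
    rw [List.splitOnP_cons]
    by_cases h : p x = true
    · simp only [h, if_true]
      intro seg hseg
      rcases List.mem_cons.mp hseg with h1 | h2
      · simp [h1]
      · exact ih seg h2
    · simp only [h]
      obtain ⟨hd, tl, hsp⟩ := List.exists_cons_of_ne_nil (List.splitOnP_ne_nil p xs)
      rw [hsp]
      intro seg hseg a ha
      rcases List.mem_cons.mp hseg with h1 | h2
      · subst h1
        rcases List.mem_cons.mp ha with rfl | h3
        · simpa using h
        · exact ih hd (by rw [hsp]; exact List.mem_cons_self) a h3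
      · exact ih seg (by rw [hsp]; exact List.mem_cons_of_mem _ h2) a ha

theorem pv_stream_aux (xs : List (List Char)) :
    xs.flatMap (fun f => [';'] ++ f) ++ [';'] = [';'] ++ xs.flatMap (fun f => f ++ [';']) := by
  induction xs with
  | nil => simp
  | cons x xs ih => simp_all

theorem pv_stream (segs : List (List Char)) (hne : segs ≠ []) :
    pvJoin [';'] segs ++ [';'] = segs.flatMap (· ++ [';']) := by
  cases segs with
  | nil => simp at hne
  | cons x xs =>
    simp only [pvJoin, List.flatMap_cons, List.append_assoc, pv_stream_aux]

theorem pvEmit_aux (xs : List (List Char)) : ∀ (k : Int), 1 ≤ k → ∀ (o : List Char),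
    (PySem.List.enumerate xs k).foldl (fun o kf => (if kf.1 == 0 then o else o ++ ['|']) ++ kf.2) o
      = o ++ xs.flatMap (fun f => ['|'] ++ f) := by
  induction xs with
  | nil => intro k hk o; simp [PySem.List.enumerate]
  | cons x xs ih =>
    intro k hk o
    have hk0 : (k == 0) = false := by simp; omega
    simp only [PySem.List.enumerate, List.foldl_cons, hk0]
    rw [ih (k+1) (by omega)]
    simp

theorem pvEmit_eq (out : List Char) (parts : List (List Char)) :
    pvEmit out parts = out ++ pvJoin ['|'] parts := by
  cases parts with
  | nil => simp [pvEmit, PySem.List.enumerate, pvJoin]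
  | cons x xs =>
    simp only [pvEmit, PySem.List.enumerate, List.foldl_cons, pvJoin]
    rw [show (0:Int)+1 = 1 from rfl, pvEmit_aux xs 1 (by omega)]
    simp

theorem pv_seg_scan (seg : List Char) (h : ∀ a ∈ seg, a ≠ ';') :
    ∀ (out : List Char) (first : Bool) (parts : List (List Char)), parts ≠ [] →
    List.foldl pvStep (out, first, parts) seg
      = (out, first, parts.dropLast ++ pvGlue (parts.getLastD []) (List.splitOnP (· == '|') seg)) := by
  induction seg with
  | nil =>
    intro out first parts hp
    obtain ⟨q, b, rfl⟩ := (List.eq_nil_or_concat parts).resolve_left hp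
    simp [pvGlue, List.concat_eq_append]
  | cons ch seg ih =>
    intro out first parts hp
    have hch : ch ≠ ';' := h ch List.mem_cons_self
    have h' : ∀ a ∈ seg, a ≠ ';' := fun a ha => h a (List.mem_cons_of_mem _ ha)
    obtain ⟨q, b, rfl⟩ := (List.eq_nil_or_concat parts).resolve_left hp
    simp only [List.concat_eq_append] at *
    rw [List.foldl_cons]
    by_cases hpipe : ch = '|'
    · subst hpipe
      have hstep : pvStep (out, first, q ++ [b]) '|' = (out, first, (q ++ [b]) ++ [[]]) := by
        simp [pvStep]
      rw [hstep, ih h' out first ((q ++ [b]) ++ [[]]) (by simp)]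
      rw [List.splitOnP_cons]
      obtain ⟨hd, tl, hsp⟩ := List.exists_cons_of_ne_nil (List.splitOnP_ne_nil (· == '|') seg)
      rw [hsp]
      simp [pvGlue]
    · have hstep : pvStep (out, first, q ++ [b]) ch
          = (out, first, q ++ [b ++ [ch]]) := by
        simp [pvStep, hch, hpipe]
      rw [hstep, ih h' out first (q ++ [b ++ [ch]]) (by simp)]
      rw [List.splitOnP_cons]
      obtain ⟨hd, tl, hsp⟩ := List.exists_cons_of_ne_nil (List.splitOnP_ne_nil (· == '|') seg)
      rw [hsp]
      simp [pvGlue, hpipe]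

theorem pv_flush (seg : List Char) (h : ∀ a ∈ seg, a ≠ ';') (out : List Char) (first : Bool) :
    List.foldl pvStep (out, first, [[]]) (seg ++ [';'])
      = ((if first then out else out ++ [';']) ++ pvFixA seg, false, [[]]) := by
  rw [List.foldl_append]
  rw [pv_seg_scan seg h out first [[]] (by simp)]
  obtain ⟨hd, tl, hsp⟩ := List.exists_cons_of_ne_nil (List.splitOnP_ne_nil (· == '|') seg)
  have hglue : ([[]] : List (List Char)).dropLast ++ pvGlue (([[]] : List (List Char)).getLastD []) (List.splitOnP (· == '|') seg) = List.splitOnP (· == '|') seg := by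
    rw [hsp]; simp [pvGlue]
  rw [hglue]
  simp only [List.foldl_cons, List.foldl_nil]
  have hcnt : (List.splitOnP (· == '|') seg).length = seg.count '|' + 1 := by
    rw [pv_length_splitOnP]; rfl
  by_cases h2 : seg.count '|' = 2
  · have hlen : ((List.splitOnP (· == '|') seg).length == 3) = true := by simp [hcnt, h2]
    simp only [pvStep, hlen, if_true]
    have : PySem.List.pyGet? (List.splitOnP (· == '|') seg) 1
        = (List.splitOnP (· == '|') seg)[1]? := by
      exact_mod_cast PySem.List.pyGet?_natCast (List.splitOnP (· == '|') seg) 1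
    simp [this, pvFixA, h2]
  · have hlen : ((List.splitOnP (· == '|') seg).length == 3) = false := by
      simp [hcnt]; omega
    simp only [pvStep, hlen, Bool.false_eq_true, if_false]
    rw [pvEmit_eq, pvJoin_eq_intercalate]
    have : ['|'].intercalate (List.splitOnP (· == '|') seg) = seg := by
      have := List.intercalate_splitOn seg '|'
      rwa [List.splitOn] at this
    rw [this]
    simp [pvFixA, h2]

theorem pv_main (segs : List (List Char)) :
    segs ≠ [] → (∀ seg ∈ segs, ∀ a ∈ seg, a ≠ ';') → ∀ (out : List Char) (first : Bool),
    List.foldl pvStep (out, first, [[]]) (segs.flatMap (· ++ [';']))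
      = ((if first then out else out ++ [';']) ++ pvJoin [';'] (segs.map pvFixA), false, [[]]) := by
  induction segs with
  | nil => intro hne; simp at hne
  | cons x xs ih =>
    intro _ h out first
    rw [List.flatMap_cons, List.foldl_append]
    rw [pv_flush x (h x List.mem_cons_self) out first]
    cases xs with
    | nil => simp [pvJoin]
    | cons y ys =>
      rw [ih (by simp) (fun s hs => h s (List.mem_cons_of_mem _ hs)) _ false]
      simp only [Bool.false_eq_true, if_false]
      rw [List.map_cons, pvJoin]
      simp only [List.map_cons, pvJoin]
      simp [List.append_assoc]

-- per-segment: A's loop body computes pvFixA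
theorem pv_fix_seg (seg : List Char) :
    (if PySem.Str.count (String.ofList seg) "|" == 2 then
        (PySem.List.pyGet? ((PySem.Str.split? (String.ofList seg) "|").getD []) 1).getD ""
      else String.ofList seg).toList = pvFixA seg := by
  have hc : PySem.Str.count (String.ofList seg) "|" = seg.count '|' := by
    rw [PySem.Str.count, String.toList_ofList, show ("|" : String).toList = ['|'] from rfl,
      pv_count_single]
  have hs : (PySem.Str.split? (String.ofList seg) "|").getD []
      = (List.splitOnP (· == '|') seg).map String.ofList := by
    rw [PySem.Str.split?, String.toList_ofList, show ("|" : String).toList = ['|'] from rfl]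
    rw [PySem.Chars.split?, if_neg (by simp)]
    simp [pv_splitOn_single]
  rw [hc, hs, pvFixA]
  by_cases h2 : seg.count '|' = 2
  · rw [if_pos (by simp [h2]), if_pos h2]
    have : PySem.List.pyGet? ((List.splitOnP (· == '|') seg).map String.ofList) 1
        = ((List.splitOnP (· == '|') seg).map String.ofList)[1]? := by
      exact_mod_cast PySem.List.pyGet?_natCast _ 1
    rw [this, List.getElem?_map]
    cases hsp : (List.splitOnP (· == '|') seg)[1]? with
    | none => simp
    | some x => simp
  · rw [if_neg (by simp [h2]), if_neg h2, String.toList_ofList]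

theorem pv_AB_eq (s : String) :
    parse_uniprot_accession s = parse_uniprot_accession_alt s := by
  unfold parse_uniprot_accession parse_uniprot_accession_alt
  have hsegs : (PySem.Str.split? s ";").getD []
      = (List.splitOnP (· == ';') s.toList).map String.ofList := by
    rw [PySem.Str.split?, show (";" : String).toList = [';'] from rfl]
    rw [PySem.Chars.split?, if_neg (by simp)]
    simp [pv_splitOn_single]
  rw [hsegs]
  set segs := List.splitOnP (· == ';') s.toList with hsegs_def
  have hne : segs ≠ [] := List.splitOnP_ne_nil _ _
  have hfree : ∀ seg ∈ segs, ∀ a ∈ seg, a ≠ ';' := by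
    intro seg hseg a ha
    have := pv_mem_splitOnP (· == ';') s.toList seg hseg a ha
    simpa using this
  have hfold : ∀ (L : List String),
      (L.foldl (fun acc accession =>
        acc ++ [if PySem.Str.count accession "|" == 2 then
            (PySem.List.pyGet? ((PySem.Str.split? accession "|").getD []) 1).getD ""
          else accession]) []) = L.map (fun accession => if PySem.Str.count accession "|" == 2 then
            (PySem.List.pyGet? ((PySem.Str.split? accession "|").getD []) 1).getD ""
          else accession) := by
    intro L
    simpa using PySem.List.foldl_append_singleton_eq_map
      (fun accession => if PySem.Str.count accession "|" == 2 then
          (PySem.List.pyGet? ((PySem.Str.split? accession "|").getD []) 1).getD ""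
        else accession) L []
  simp only []
  rw [hfold]
  have hstream : s.toList ++ [';'] = segs.flatMap (· ++ [';']) := by
    rw [← pv_stream segs hne, pvJoin_eq_intercalate]
    have := List.intercalate_splitOn s.toList ';'
    rw [List.splitOn] at this
    rw [this]
  rw [hstream, pv_main segs hne hfree [] true]
  rw [PySem.Str.join, PySem.Chars.join]
  rw [show (";" : String).toList = [';'] from rfl]
  congr 1
  rw [← pvJoin_eq_intercalate]
  congr 1
  rw [List.map_map, List.map_map]
  apply List.map_congr_left
  intro seg hseg
  simpa using pv_fix_seg seg

-- ===== VERDICT (by name: the statement is the Claim_ definition above) =====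
theorem parse_uniprot_accession_spec : Claim_equal_parse_uniprot_accession := by
  intro uniprot_id _
  unfold Spec_parse_uniprot_accession
  exact pv_AB_eq uniprot_id
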